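-- pv_equiv track=rewrite | github.com/EsosaOrumwese/fraud-detection-system | src/fraud_detection/offline_feature_plane/phase4.py | _intervals_from_offsets
-- ===== SOURCE A (Python) =====
-- def _intervals_from_offsets(offsets: list[int]) -> list[tuple[int, int]]:
--     if not offsets:
--         return []
--     unique = sorted(set(offsets))
--     start = unique[0]
--     prev = unique[0]
--     rows: list[tuple[int, int]] = []
--     for value in unique[1:]:
--         if value == prev + 1:
--             prev = value
--             continue
--         rows.append((start, prev))
--         start = value
--         prev = value
--     rows.append((start, prev))
--     return rows
-- ===== SOURCE B (Python) =====
-- from itertools import groupby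
--
--
-- def _intervals_from_offsets(offsets: list[int]) -> list[tuple[int, int]]:
--     unique = sorted(set(offsets))
--     if not unique:
--         return []
--     rows: list[tuple[int, int]] = []
--     for _, grp in groupby(enumerate(unique), key=lambda iv: iv[1] - iv[0]):
--         vals = list(grp)
--         rows.append((vals[0][1], vals[-1][1]))
--     return rows
-- ===== Notes on version B (the rewrite author's own statement) =====
-- stated objective: idiomatic
-- what changed: Replaces the manual start/prev boundary loop with itertools.groupby over enumerate(unique) keyed by value-index, so consecutive integers fall into one group and each group yields (first, last).
import Mathlib
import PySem

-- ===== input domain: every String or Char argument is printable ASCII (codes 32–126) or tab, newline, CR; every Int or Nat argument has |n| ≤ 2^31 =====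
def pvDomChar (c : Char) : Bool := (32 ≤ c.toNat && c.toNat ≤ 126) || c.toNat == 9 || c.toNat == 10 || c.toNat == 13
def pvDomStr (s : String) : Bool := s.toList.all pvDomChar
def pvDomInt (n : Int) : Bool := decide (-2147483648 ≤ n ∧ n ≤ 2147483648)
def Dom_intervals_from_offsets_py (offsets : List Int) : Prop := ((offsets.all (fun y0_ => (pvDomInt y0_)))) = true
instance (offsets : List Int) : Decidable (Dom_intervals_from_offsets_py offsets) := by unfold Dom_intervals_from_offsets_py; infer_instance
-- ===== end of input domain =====

-- B replaces A's manual start/prev boundary loop with itertools.groupby over enumerate(unique)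
-- keyed by value - index (idiomatic rewrite; same cost).

-- ===== PORT A =====
-- the loop over unique[1:] with state (start, prev, rows), then the final rows.append
def pvLoopA (u0 : Int) (rest : List Int) : List (Int × Int) :=
  let f := rest.foldl
      (fun (st : Int × Int × List (Int × Int)) value =>
        if value = st.2.1 + 1 then (st.1, value, st.2.2)
        else (value, value, st.2.2 ++ [(st.1, st.2.1)]))
      (u0, u0, ([] : List (Int × Int)))
  f.2.2 ++ [(f.1, f.2.1)]

def intervals_from_offsets_py (offsets : List Int) : List (Int × Int) :=
  if offsets = [] then []
  else
    match PySem.List.sorted (PySem.Set.ofList offsets) (fun x => x) false with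
    | [] => []  -- unreachable: offsets ≠ [] so sorted(set(offsets)) is nonempty (unique[0] never raises)
    | u0 :: rest => pvLoopA u0 rest

-- ===== PORT B =====
-- itertools.groupby(xs, key): the list of maximal runs of consecutive elements with equal key
def pvGroupby (key : Int × Int → Int) : List (Int × Int) → List (List (Int × Int))
  | [] => []
  | x :: xs =>
    match pvGroupby key xs with
    | [] => [[x]]
    | [] :: gs => [x] :: [] :: gs   -- unreachable: groupby groups are nonempty
    | (y :: g) :: gs =>
      if key x = key y then (x :: y :: g) :: gs else [x] :: (y :: g) :: gs

-- (vals[0][1], vals[-1][1]) of one group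
def pvRowOf (vals : List (Int × Int)) : Int × Int :=
  match vals with
  | [] => (0, 0)  -- unreachable: groupby groups are nonempty
  | v :: vs => (v.2, (vs.getLastD v).2)

def intervals_from_offsets_py_alt (offsets : List Int) : List (Int × Int) :=
  let unique := PySem.List.sorted (PySem.Set.ofList offsets) (fun x => x) false
  if unique = [] then []
  else
    (pvGroupby (fun iv => iv.2 - iv.1) (PySem.List.enumerate unique)).map pvRowOf

-- ===== PRECONDITION & SPEC =====
def Spec_intervals_from_offsets_py (offsets : List Int) (out : List (Int × Int)) : Prop := out = intervals_from_offsets_py_alt offsets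
instance (offsets : List Int) (out : List (Int × Int)) : Decidable (Spec_intervals_from_offsets_py offsets out) := by unfold Spec_intervals_from_offsets_py; infer_instance

-- ===== CLAIM (what is proved, stated in full; the proofs are below) =====
def Claim_equal_intervals_from_offsets_py : Prop := ∀ (offsets : List Int), Dom_intervals_from_offsets_py offsets → Spec_intervals_from_offsets_py offsets (intervals_from_offsets_py offsets)

-- ===== LEMMAS AND PROOFS =====

-- common characterisation: the maximal-run intervals of a strictly structured scan
def pvRuns : Int → Int → List Int → List (Int × Int)
  | start, prev, [] => [(start, prev)]
  | start, prev, v :: vs => if v = prev + 1 then pvRuns start v vs else (start, prev) :: pvRuns v v vs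

def pvRunEnd : Int → List Int → Int
  | prev, [] => prev
  | prev, v :: vs => if v = prev + 1 then pvRunEnd v vs else prev

def pvRunTail : Int → List Int → List (Int × Int)
  | _, [] => []
  | prev, v :: vs => if v = prev + 1 then pvRunTail v vs else pvRuns v v vs

theorem pvRuns_eq (vs : List Int) : ∀ prev s : Int,
    pvRuns s prev vs = (s, pvRunEnd prev vs) :: pvRunTail prev vs := by
  induction vs with
  | nil => intro prev s; rfl
  | cons v vs ih =>
    intro prev s
    simp only [pvRuns, pvRunEnd, pvRunTail]
    split_ifs with h
    · exact ih v s
    · rfl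

theorem pvFoldA (rest : List Int) : ∀ (start prev : Int) (rows : List (Int × Int)),
    (let f := rest.foldl
        (fun (st : Int × Int × List (Int × Int)) value =>
          if value = st.2.1 + 1 then (st.1, value, st.2.2)
          else (value, value, st.2.2 ++ [(st.1, st.2.1)]))
        (start, prev, rows)
     f.2.2 ++ [(f.1, f.2.1)]) = rows ++ pvRuns start prev rest := by
  induction rest with
  | nil => intro start prev rows; simp [pvRuns]
  | cons v vs ih =>
    intro start prev rows
    simp only [List.foldl_cons, pvRuns]
    split_ifs with h
    · exact ih start v rows
    · rw [ih v v (rows ++ [(start, prev)])]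
      simp

theorem pvLoopA_eq (u0 : Int) (rest : List Int) : pvLoopA u0 rest = pvRuns u0 u0 rest := by
  have h := pvFoldA rest u0 u0 []
  simpa [pvLoopA] using h

theorem pvGroupbyEnum (rest : List Int) : ∀ (i u0 : Int),
    ∃ g gs,
      pvGroupby (fun iv => iv.2 - iv.1) (PySem.List.enumerate (u0 :: rest) i)
        = ((i, u0) :: g) :: gs ∧
      (g.getLastD (i, u0)).2 = pvRunEnd u0 rest ∧
      gs.map pvRowOf = pvRunTail u0 rest := by
  induction rest with
  | nil =>
    intro i u0
    exact ⟨[], [], by simp [PySem.List.enumerate_cons, PySem.List.enumerate_nil, pvGroupby],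
      rfl, rfl⟩
  | cons v vs ih =>
    intro i u0
    obtain ⟨g, gs, hgb, hend, htail⟩ := ih (i + 1) v
    rw [PySem.List.enumerate_cons]
    by_cases h : v = u0 + 1
    · refine ⟨(i + 1, v) :: g, gs, ?_, ?_, ?_⟩
      · simp only [pvGroupby, hgb]
        have : (fun iv : Int × Int => iv.2 - iv.1) (i, u0)
             = (fun iv : Int × Int => iv.2 - iv.1) (i + 1, v) := by
          show u0 - i = v - (i + 1); omega
        simp [this]
      · rw [List.getLastD_cons, hend]
        simp [pvRunEnd, h]
      · rw [htail]; simp [pvRunTail, h]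
    · refine ⟨[], ((i + 1, v) :: g) :: gs, ?_, ?_, ?_⟩
      · simp only [pvGroupby, hgb]
        have : ¬ ((fun iv : Int × Int => iv.2 - iv.1) (i, u0)
             = (fun iv : Int × Int => iv.2 - iv.1) (i + 1, v)) := by
          simp only []
          intro hc
          apply h
          omega
        simp [this]
      · simp [pvRunEnd, h]
      · have hrow : pvRowOf ((i + 1, v) :: g) = (v, pvRunEnd v vs) := by
          rw [show pvRowOf ((i + 1, v) :: g) = (v, (g.getLastD (i + 1, v)).2) from rfl, hend]
        simp only [List.map_cons, htail, pvRunTail, h, if_false, hrow]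
        rw [pvRuns_eq]

-- ===== VERDICT (by name: the statement is the Claim_ definition above) =====
theorem intervals_from_offsets_py_spec : Claim_equal_intervals_from_offsets_py := by
  intro offsets _
  unfold Spec_intervals_from_offsets_py intervals_from_offsets_py intervals_from_offsets_py_alt
  by_cases hoff : offsets = []
  · subst hoff; rfl
  · have hset : PySem.Set.ofList offsets ≠ [] := by
      obtain ⟨x, xs, rfl⟩ := List.exists_cons_of_ne_nil hoff
      intro hc
      have : x ∈ PySem.Set.ofList (x :: xs) := by
        rw [PySem.Set.mem_ofList]; exact List.mem_cons_self
      rw [hc] at this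
      exact List.not_mem_nil this
    have hsort : PySem.List.sorted (PySem.Set.ofList offsets) (fun x => x) false ≠ [] := by
      rw [Ne, PySem.List.sorted_eq_nil_iff]; exact hset
    simp only [if_neg hoff, if_neg hsort]
    obtain ⟨u0, rest, hu⟩ := List.exists_cons_of_ne_nil hsort
    rw [hu]
    obtain ⟨g, gs, hgb, hend, htail⟩ := pvGroupbyEnum rest 0 u0
    show pvLoopA u0 rest = _
    rw [pvLoopA_eq, hgb]
    have hrow : pvRowOf ((0, u0) :: g) = (u0, pvRunEnd u0 rest) := by
      rw [show pvRowOf ((0, u0) :: g) = (u0, (g.getLastD (0, u0)).2) from rfl, hend]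
    simp only [List.map_cons, htail, hrow]
    rw [pvRuns_eq]
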